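-- pv_equiv track=rewrite | github.com/yanghailin007-dotcom/xsdm | fix_all_remaining_imports.py | get_insert_position
-- ===== SOURCE A (Python) =====
-- def get_insert_position(content):
--     """找到第一个 from src. 或 import 语句的位置"""
--     lines = content.split('\n')
--
--     for i, line in enumerate(lines):
--         stripped = line.strip()
--         if stripped.startswith(('from src.', 'import ')):
--             # 回退找到非空行和非注释行
--             while i > 0 and (not lines[i-1].strip() or lines[i-1].strip().startswith('#')):
--                 i -= 1
--             return i
--     return 0
-- ===== SOURCE B (Python) =====
-- def get_insert_position(content):
--     """找到第一个 from src. 或 import 语句的位置"""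
--     anchor = 0
--     for i, line in enumerate(content.split('\n')):
--         stripped = line.strip()
--         if stripped.startswith(('from src.', 'import ')):
--             return anchor
--         if stripped and not stripped.startswith('#'):
--             anchor = i + 1
--     return 0
-- ===== Notes on version B (the rewrite author's own statement) =====
-- stated objective: simpler
-- what changed: Single forward pass maintaining an insertion anchor (index just past the last non-blank non-comment line) instead of finding the import line and then backtracking over blank/comment lines.
import Mathlib
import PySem

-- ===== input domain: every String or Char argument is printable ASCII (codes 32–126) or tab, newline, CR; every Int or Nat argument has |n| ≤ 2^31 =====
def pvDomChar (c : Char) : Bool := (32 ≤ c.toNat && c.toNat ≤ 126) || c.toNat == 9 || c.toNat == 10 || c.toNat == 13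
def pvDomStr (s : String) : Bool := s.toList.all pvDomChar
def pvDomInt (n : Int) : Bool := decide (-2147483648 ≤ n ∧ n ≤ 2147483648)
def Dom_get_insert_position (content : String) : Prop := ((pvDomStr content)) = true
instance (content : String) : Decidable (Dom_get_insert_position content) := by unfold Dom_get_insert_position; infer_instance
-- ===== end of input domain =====

-- B replaces A's find-then-backtrack with a single forward pass tracking the insertion anchor; same return value, proved below.

-- ===== PORT A =====
-- the while loop: while i > 0 and (not lines[i-1].strip() or lines[i-1].strip().startswith('#')): i -= 1
def pvBackA (lines : List String) : Nat → Nat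
  | 0 => 0
  | i + 1 =>
    let prev := PySem.Str.strip (lines.getD i "")   -- lines[i-1]; always in range when reached
    if prev = "" || PySem.Str.startswith prev "#" then pvBackA lines i else i + 1

-- the for loop over enumerate(lines)
def pvLoopA (lines : List String) : List String → Nat → Int
  | [], _ => 0
  | line :: rest, i =>
    let stripped := PySem.Str.strip line
    if PySem.Str.startswith stripped "from src." || PySem.Str.startswith stripped "import " then
      (pvBackA lines i : Int)
    else
      pvLoopA lines rest (i + 1)

def get_insert_position (content : String) : Int :=
  let lines := (PySem.Str.split? content "\n").getD []   -- split? is some: sep "\n" ≠ ""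
  pvLoopA lines lines 0

-- ===== PORT B =====
def pvLoopB : List String → Nat → Nat → Int
  | [], _, _ => 0
  | line :: rest, i, anchor =>
    let stripped := PySem.Str.strip line
    if PySem.Str.startswith stripped "from src." || PySem.Str.startswith stripped "import " then
      (anchor : Int)
    else
      pvLoopB rest (i + 1)
        (if stripped ≠ "" ∧ PySem.Str.startswith stripped "#" = false then i + 1 else anchor)

def get_insert_position_alt (content : String) : Int :=
  pvLoopB ((PySem.Str.split? content "\n").getD []) 0 0

-- ===== PRECONDITION & SPEC =====
def Spec_get_insert_position (content : String) (out : Int) : Prop := out = get_insert_position_alt content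
instance (content : String) (out : Int) : Decidable (Spec_get_insert_position content out) := by unfold Spec_get_insert_position; infer_instance

-- ===== CLAIM (what is proved, stated in full; the proofs are below) =====
def Claim_equal_get_insert_position : Prop := ∀ (content : String), Dom_get_insert_position content → Spec_get_insert_position content (get_insert_position content)

-- ===== LEMMAS AND PROOFS =====

-- one step of B's anchor update is one more layer of A's backtracking structure
theorem pvBackA_succ (lines : List String) (i : Nat) :
    pvBackA lines (i + 1) =
      (if PySem.Str.strip (lines.getD i "") ≠ "" ∧
          PySem.Str.startswith (PySem.Str.strip (lines.getD i "")) "#" = false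
       then i + 1 else pvBackA lines i) := by
  simp only [pvBackA]
  split_ifs with h1 h2 <;> simp_all

-- loop invariant: B's anchor equals A's backtrack value at the current index
set_option maxHeartbeats 800000 in
theorem pvLoop_agree (full : List String) :
    ∀ (rest : List String) (i : Nat), rest = full.drop i →
      pvLoopA full rest i = pvLoopB rest i (pvBackA full i) := by
  intro rest
  induction rest with
  | nil => intro i _; rfl
  | cons line t ih =>
    intro i hdrop
    have h0 : full[i]? = some line := by
      have h : (List.drop i full)[0]? = full[i + 0]? := List.getElem?_drop
      rw [← hdrop] at h
      simpa using h.symm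
    have hget : full.getD i "" = line := by
      simp [List.getD, h0]
    have ht : t = full.drop (i + 1) := by
      rw [← List.tail_drop, ← hdrop]
      rfl
    simp only [pvLoopA, pvLoopB]
    split_ifs with hc hb
    · rfl
    · rw [ih (i + 1) ht, pvBackA_succ, hget, if_pos hb]
    · rw [ih (i + 1) ht, pvBackA_succ, hget, if_neg hb]

-- ===== VERDICT (by name: the statement is the Claim_ definition above) =====
theorem get_insert_position_spec : Claim_equal_get_insert_position := by
  intro content _
  show get_insert_position content = get_insert_position_alt content
  unfold get_insert_position get_insert_position_alt
  exact pvLoop_agree _ _ 0 rfl
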